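-- pv_equiv track=rewrite | github.com/tranmich/yeschef-app | core_systems/production_flavor_system.py | _extract_flavor_notes
-- ===== SOURCE A (Python) =====
-- from typing import Dict, List, Set, Tuple, Any, Optional
--
-- def _extract_flavor_notes(properties: Dict) -> List[str]:
--     """Extract flavor notes from properties"""
--
--     notes = []
--
--     if 'taste' in properties:
--         taste_desc = properties['taste'].lower()
--
--         # Common flavor descriptors
--         flavor_keywords = {
--             'sweet': 'sweet',
--             'savory': 'savory', 'umami': 'savory',
--             'sour': 'acidic', 'tart': 'acidic', 'bright': 'acidic',
--             'bitter': 'bitter',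
--             'rich': 'rich', 'creamy': 'rich', 'fatty': 'rich',
--             'spicy': 'spicy', 'hot': 'spicy',
--             'mild': 'mild', 'delicate': 'mild',
--             'pungent': 'pungent', 'strong': 'pungent'
--         }
--
--         for keyword, note in flavor_keywords.items():
--             if keyword in taste_desc and note not in notes:
--                 notes.append(note)
--
--     return notes if notes else ['neutral']
-- ===== SOURCE B (Python) =====
-- _NOTE_OF = {
--     'sweet': 'sweet',
--     'savory': 'savory', 'umami': 'savory',
--     'sour': 'acidic', 'tart': 'acidic', 'bright': 'acidic',
--     'bitter': 'bitter',
--     'rich': 'rich', 'creamy': 'rich', 'fatty': 'rich',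
--     'spicy': 'spicy', 'hot': 'spicy',
--     'mild': 'mild', 'delicate': 'mild',
--     'pungent': 'pungent', 'strong': 'pungent',
-- }
-- _NOTE_ORDER = ['sweet', 'savory', 'acidic', 'bitter', 'rich', 'spicy', 'mild', 'pungent']
--
--
-- def _extract_flavor_notes(properties):
--     """Extract flavor notes: a position-driven scan of the taste string.
--
--     Instead of running one substring search per keyword, walk the taste
--     description left to right and at every position record the note of any
--     keyword that starts there (naive multi-pattern matching into a set),
--     then project the matched set onto the fixed note order.
--     """
--     if 'taste' not in properties:
--         return ['neutral']
--     t = properties['taste'].lower()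
--     matched = set()
--     for i in range(len(t) + 1):
--         for kw, note in _NOTE_OF.items():
--             if t.startswith(kw, i):
--                 matched.add(note)
--     notes = [n for n in _NOTE_ORDER if n in matched]
--     return notes if notes else ['neutral']
-- ===== Notes on version B (the rewrite author's own statement) =====
-- stated objective: alternative
-- what changed: Replaces per-keyword substring searches with an explicit dedup list by a single position-driven scan of the taste string that matches all keyword prefixes at each position into a set, then projects that set onto the fixed note order.
import Mathlib
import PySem

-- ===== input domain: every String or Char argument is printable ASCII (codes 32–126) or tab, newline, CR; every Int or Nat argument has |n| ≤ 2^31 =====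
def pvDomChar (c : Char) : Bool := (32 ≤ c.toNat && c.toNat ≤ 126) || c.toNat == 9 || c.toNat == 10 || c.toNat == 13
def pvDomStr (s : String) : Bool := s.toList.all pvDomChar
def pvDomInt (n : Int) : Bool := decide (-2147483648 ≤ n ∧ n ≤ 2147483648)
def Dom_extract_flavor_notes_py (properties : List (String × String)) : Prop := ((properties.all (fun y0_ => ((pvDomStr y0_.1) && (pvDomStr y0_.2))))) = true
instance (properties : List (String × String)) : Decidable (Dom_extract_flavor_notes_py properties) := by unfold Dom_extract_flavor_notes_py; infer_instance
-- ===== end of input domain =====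

-- B replaces A's per-keyword substring searches with dedup-by-membership-scan by a single
-- position-driven scan of the taste string that matches keyword prefixes at each position into a
-- set, then projects that set onto the fixed note order (alternative algorithm, similar cost).


-- ===== PORT A =====
-- A's flavor_keywords dict, in insertion order (keyword, note)
def pvKeywordsA : List (String × String) :=
  [("sweet", "sweet"),
   ("savory", "savory"), ("umami", "savory"),
   ("sour", "acidic"), ("tart", "acidic"), ("bright", "acidic"),
   ("bitter", "bitter"),
   ("rich", "rich"), ("creamy", "rich"), ("fatty", "rich"),
   ("spicy", "spicy"), ("hot", "spicy"),
   ("mild", "mild"), ("delicate", "mild"),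
   ("pungent", "pungent"), ("strong", "pungent")]

def extract_flavor_notes_py (properties : List (String × String)) : List String :=
  let notes : List String :=
    match (PySem.Dict.mk properties).get? "taste" with
    | none => []
    | some t =>
      let taste_desc := PySem.Str.lower t
      pvKeywordsA.foldl
        (fun notes kn =>
          if PySem.Str.isIn kn.1 taste_desc && !(notes.contains kn.2) then notes ++ [kn.2]
          else notes) []
  if notes = [] then ["neutral"] else notes

-- ===== PORT B =====
-- B's _NOTE_OF dict (keyword, note) and _NOTE_ORDER list
def pvNoteOf : List (String × String) :=
  [("sweet", "sweet"),
   ("savory", "savory"), ("umami", "savory"),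
   ("sour", "acidic"), ("tart", "acidic"), ("bright", "acidic"),
   ("bitter", "bitter"),
   ("rich", "rich"), ("creamy", "rich"), ("fatty", "rich"),
   ("spicy", "spicy"), ("hot", "spicy"),
   ("mild", "mild"), ("delicate", "mild"),
   ("pungent", "pungent"), ("strong", "pungent")]

def pvNoteOrder : List String :=
  ["sweet", "savory", "acidic", "bitter", "rich", "spicy", "mild", "pungent"]

-- Python's t.startswith(kw, i): exact for 0 ≤ i (all i here come from range(len(t)+1))
def pvStartsAt (s kw : String) (i : Int) : Bool :=
  PySem.Chars.startswith (s.toList.drop i.toNat) kw.toList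

-- the body of B's inner loop (over _NOTE_OF.items()) and outer loop (over range(len(t)+1))
def pvInnerStep (t : String) (i : Int) (m : PySem.Set String) (kn : String × String) : PySem.Set String :=
  if pvStartsAt t kn.1 i then PySem.Set.add m kn.2 else m

def pvOuterStep (t : String) (m : PySem.Set String) (i : Int) : PySem.Set String :=
  pvNoteOf.foldl (pvInnerStep t i) m

def extract_flavor_notes_py_alt (properties : List (String × String)) : List String :=
  match (PySem.Dict.mk properties).get? "taste" with
  | none => ["neutral"]
  | some tv =>
    let t := PySem.Str.lower tv
    let matched : PySem.Set String :=
      (PySem.List.pyRange 0 (PySem.Str.len t + 1) 1).foldl (pvOuterStep t) PySem.Set.empty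
    let notes := pvNoteOrder.filter (fun n => PySem.Set.contains matched n)
    if notes = [] then ["neutral"] else notes

-- ===== PRECONDITION & SPEC =====
def Spec_extract_flavor_notes_py (properties : List (String × String)) (out : List String) : Prop := out = extract_flavor_notes_py_alt properties
instance (properties : List (String × String)) (out : List String) : Decidable (Spec_extract_flavor_notes_py properties out) := by unfold Spec_extract_flavor_notes_py; infer_instance

-- ===== CLAIM (what is proved, stated in full; the proofs are below) =====
def Claim_equal_extract_flavor_notes_py : Prop := ∀ (properties : List (String × String)), Dom_extract_flavor_notes_py properties → Spec_extract_flavor_notes_py properties (extract_flavor_notes_py properties)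

-- ===== LEMMAS AND PROOFS =====

-- A's fold step, abstracted over the substring test
def pvStep (f : String → Bool) (notes : List String) (kn : String × String) : List String :=
  if f kn.1 && !(notes.contains kn.2) then notes ++ [kn.2] else notes

-- generic: a fold whose step adds exactly the elements satisfying P
lemma pvMemFoldl {β : Type} (step : PySem.Set String → β → PySem.Set String)
    (P : String → β → Prop)
    (h : ∀ m b x, x ∈ step m b ↔ x ∈ m ∨ P x b) :
    ∀ (l : List β) (m : PySem.Set String) (x : String),
      x ∈ l.foldl step m ↔ x ∈ m ∨ ∃ b ∈ l, P x b := by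
  intro l
  induction l with
  | nil => intro m x; simp
  | cons b l ih =>
    intro m x
    simp only [List.foldl_cons, ih, h, List.mem_cons]
    constructor
    · rintro ((hm | hp) | ⟨b', hb', hp⟩)
      · exact .inl hm
      · exact .inr ⟨b, .inl rfl, hp⟩
      · exact .inr ⟨b', .inr hb', hp⟩
    · rintro (hm | ⟨b', (rfl | hb'), hp⟩)
      · exact .inl (.inl hm)
      · exact .inl (.inr hp)
      · exact .inr ⟨b', hb', hp⟩

-- membership in B's matched set = some keyword-note pair with the keyword starting somewhere
lemma pvMemMatched (t : String) (x : String) :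
    (x ∈ (PySem.List.pyRange 0 (PySem.Str.len t + 1) 1).foldl (pvOuterStep t) PySem.Set.empty)
      ↔ ∃ kn ∈ pvNoteOf, kn.2 = x ∧ PySem.Str.isIn kn.1 t = true := by
  have hlen : PySem.Str.len t = (t.toList.length : Int) := by
    simp [PySem.Str.len_eq, PySem.Chars.len]
  have hinner : ∀ (m : PySem.Set String) (i : Int) (x : String),
      x ∈ pvOuterStep t m i
        ↔ x ∈ m ∨ ∃ kn ∈ pvNoteOf, pvStartsAt t kn.1 i = true ∧ kn.2 = x := by
    intro m i x
    exact pvMemFoldl (pvInnerStep t i)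
      (fun x kn => pvStartsAt t kn.1 i = true ∧ kn.2 = x)
      (fun m kn x => by
        unfold pvInnerStep
        split_ifs with h
        · simp [PySem.Set.mem_add, h, eq_comm]
        · simp [h]) pvNoteOf m x
  rw [pvMemFoldl (pvOuterStep t)
    (fun x i => ∃ kn ∈ pvNoteOf, pvStartsAt t kn.1 i = true ∧ kn.2 = x)
    hinner (PySem.List.pyRange 0 (PySem.Str.len t + 1) 1) PySem.Set.empty x]
  simp only [PySem.Set.empty, List.not_mem_nil, false_or]
  constructor
  · rintro ⟨i, hi, kn, hkn, hstart, rfl⟩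
    refine ⟨kn, hkn, rfl, ?_⟩
    have hpref : kn.1.toList <+: t.toList.drop i.toNat :=
      (PySem.Chars.startswith_iff _ _).mp hstart
    have hin : PySem.Chars.isIn kn.1.toList t.toList = true :=
      (PySem.Chars.exists_prefix_drop_iff_isIn _ _).mp ⟨_, hpref⟩
    exact (PySem.Str.isIn_iff_infix _ _).mpr ((PySem.Chars.isIn_iff_infix _ _).mp hin)
  · rintro ⟨kn, hkn, rfl, hin⟩
    have hin' : PySem.Chars.isIn kn.1.toList t.toList = true :=
      (PySem.Chars.isIn_iff_infix _ _).mpr ((PySem.Str.isIn_iff_infix _ _).mp hin)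
    obtain ⟨j, hj⟩ := (PySem.Chars.exists_prefix_drop_iff_isIn _ _).mpr hin'
    -- clamp the occurrence index to the string length (drop past the end is [])
    have hj2 : kn.1.toList <+: t.toList.drop (min j t.toList.length) := by
      rcases le_total j t.toList.length with h | h
      · rwa [min_eq_left h]
      · rw [min_eq_right h, List.drop_length]
        rwa [List.drop_eq_nil_of_le h] at hj
    refine ⟨((min j t.toList.length : Nat) : Int), ?_, kn, hkn, ?_, rfl⟩
    · rw [PySem.List.mem_pyRange_one, hlen]
      have := min_le_right j t.toList.length
      omega
    · rw [pvStartsAt, Int.toNat_natCast]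
      exact (PySem.Chars.startswith_iff _ _).mpr hj2

-- once a note is already present, a run of keywords all mapping to that note changes nothing
lemma pvFold_fixed (f : String → Bool) (n : String) (ks : List String) (acc : List String)
    (h : acc.contains n = true) :
    (ks.map (fun k => (k, n))).foldl (pvStep f) acc = acc := by
  induction ks with
  | nil => rfl
  | cons k ks ih =>
    have hm : n ∈ acc := by simpa [List.contains_eq_mem] using h
    simp [pvStep, hm, ih]

-- one group: if the note is not yet present, the fold appends it iff some keyword matches
lemma pvFold_group (f : String → Bool) (n : String) (ks : List String) (acc : List String)
    (h : acc.contains n = false) :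
    (ks.map (fun k => (k, n))).foldl (pvStep f) acc
      = if ks.any f then acc ++ [n] else acc := by
  induction ks with
  | nil => simp
  | cons k ks ih =>
    by_cases hk : f k = true
    · have hm : n ∉ acc := by simpa [List.contains_eq_mem] using h
      have : (acc ++ [n]).contains n = true := by simp
      simp [pvStep, hk, hm, pvFold_fixed f n ks _ this]
    · simp only [Bool.not_eq_true] at hk
      simp [pvStep, hk, ih]

-- B's groups (proof-side view of A's keyword list)
def pvGroups : List (String × List String) :=
  [("sweet", ["sweet"]),
   ("savory", ["savory", "umami"]),
   ("acidic", ["sour", "tart", "bright"]),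
   ("bitter", ["bitter"]),
   ("rich", ["rich", "creamy", "fatty"]),
   ("spicy", ["spicy", "hot"]),
   ("mild", ["mild", "delicate"]),
   ("pungent", ["pungent", "strong"])]

-- the whole fold over grouped keywords equals the per-group filterMap
lemma pvFold_groups (f : String → Bool) (groups : List (String × List String))
    (acc : List String)
    (hfresh : ∀ g ∈ groups, acc.contains g.1 = false)
    (hnodup : (groups.map Prod.fst).Nodup) :
    ((groups.flatMap (fun g => g.2.map (fun k => (k, g.1)))).foldl (pvStep f) acc)
      = acc ++ groups.filterMap (fun g => if g.2.any f then some g.1 else none) := by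
  induction groups generalizing acc with
  | nil => simp
  | cons g groups ih =>
    simp only [List.flatMap_cons, List.foldl_append]
    rw [pvFold_group f g.1 g.2 acc (hfresh g (by simp))]
    simp only [List.map_cons, List.nodup_cons] at hnodup
    by_cases hany : g.2.any f = true
    · rw [if_pos hany, ih (acc ++ [g.1]) ?_ hnodup.2]
      · have hany' : ∃ x ∈ g.2, f x = true := by simpa using hany
        simp [List.filterMap_cons, hany']
      · intro g' hg'
        have h1 := hfresh g' (by simp [hg'])
        have h2 : g.1 ≠ g'.1 := fun he => hnodup.1 (he ▸ List.mem_map_of_mem hg')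
        simp [List.contains_eq_mem] at h1 ⊢
        exact ⟨h1, fun he => h2 he.symm⟩
    · simp only [Bool.not_eq_true] at hany
      rw [if_neg (by simp [hany]), ih acc (fun g' hg' => hfresh g' (by simp [hg'])) hnodup.2]
      have hany' : ¬ ∃ x ∈ g.2, f x = true := by simpa using hany
      simp [List.filterMap_cons, hany']

lemma pvKeywordsA_eq : pvKeywordsA = pvGroups.flatMap (fun g => g.2.map (fun k => (k, g.1))) := by
  decide

-- A's note list as a per-group filterMap
lemma pvCoreA (s : String) :
    pvKeywordsA.foldl
        (fun notes kn =>
          if PySem.Str.isIn kn.1 s && !(notes.contains kn.2) then notes ++ [kn.2]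
          else notes) []
      = pvGroups.filterMap
          (fun g => if g.2.any (fun k => PySem.Str.isIn k s) then some g.1 else none) := by
  rw [pvKeywordsA_eq]
  exact pvFold_groups (fun k => PySem.Str.isIn k s) pvGroups [] (by decide) (by decide)

-- B's filter over the order list equals A's filterMap over the groups
lemma pvCoreB (t : String) :
    pvNoteOrder.filter (fun n => PySem.Set.contains
        ((PySem.List.pyRange 0 (PySem.Str.len t + 1) 1).foldl (pvOuterStep t) PySem.Set.empty) n)
      = pvGroups.filterMap
          (fun g => if g.2.any (fun k => PySem.Str.isIn k t) then some g.1 else none) := by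
  set X := (PySem.List.pyRange 0 (PySem.Str.len t + 1) 1).foldl (pvOuterStep t) PySem.Set.empty
    with hX
  have hc : ∀ n : String, PySem.Set.contains X n
      = decide (∃ kn ∈ pvNoteOf, kn.2 = n ∧ PySem.Str.isIn kn.1 t = true) := by
    intro n
    cases hb : PySem.Set.contains X n with
    | false =>
      have hnm : n ∉ X := fun hmem => by
        rw [(PySem.Set.contains_iff X n).mpr hmem] at hb; cases hb
      rw [hX] at hnm
      rw [pvMemMatched t n] at hnm
      exact (decide_eq_false hnm).symm
    | true =>
      have hmem : n ∈ X := (PySem.Set.contains_iff X n).mp hb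
      rw [hX] at hmem
      rw [pvMemMatched t n] at hmem
      exact (decide_eq_true hmem).symm
  simp only [hc]
  have e1 : decide (∃ kn ∈ pvNoteOf, kn.2 = "sweet" ∧ PySem.Str.isIn kn.1 t = true)
      = (["sweet"] : List String).any (fun k => PySem.Str.isIn k t) := by
    simp [pvNoteOf, Bool.or_comm, Bool.or_assoc, Bool.or_left_comm]
  have e2 : decide (∃ kn ∈ pvNoteOf, kn.2 = "savory" ∧ PySem.Str.isIn kn.1 t = true)
      = (["savory", "umami"] : List String).any (fun k => PySem.Str.isIn k t) := by
    simp [pvNoteOf, Bool.or_comm, Bool.or_assoc, Bool.or_left_comm]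
  have e3 : decide (∃ kn ∈ pvNoteOf, kn.2 = "acidic" ∧ PySem.Str.isIn kn.1 t = true)
      = (["sour", "tart", "bright"] : List String).any (fun k => PySem.Str.isIn k t) := by
    simp [pvNoteOf, Bool.or_comm, Bool.or_assoc, Bool.or_left_comm]
  have e4 : decide (∃ kn ∈ pvNoteOf, kn.2 = "bitter" ∧ PySem.Str.isIn kn.1 t = true)
      = (["bitter"] : List String).any (fun k => PySem.Str.isIn k t) := by
    simp [pvNoteOf, Bool.or_comm, Bool.or_assoc, Bool.or_left_comm]
  have e5 : decide (∃ kn ∈ pvNoteOf, kn.2 = "rich" ∧ PySem.Str.isIn kn.1 t = true)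
      = (["rich", "creamy", "fatty"] : List String).any (fun k => PySem.Str.isIn k t) := by
    simp [pvNoteOf, Bool.or_comm, Bool.or_assoc, Bool.or_left_comm]
  have e6 : decide (∃ kn ∈ pvNoteOf, kn.2 = "spicy" ∧ PySem.Str.isIn kn.1 t = true)
      = (["spicy", "hot"] : List String).any (fun k => PySem.Str.isIn k t) := by
    simp [pvNoteOf, Bool.or_comm, Bool.or_assoc, Bool.or_left_comm]
  have e7 : decide (∃ kn ∈ pvNoteOf, kn.2 = "mild" ∧ PySem.Str.isIn kn.1 t = true)
      = (["mild", "delicate"] : List String).any (fun k => PySem.Str.isIn k t) := by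
    simp [pvNoteOf, Bool.or_comm, Bool.or_assoc, Bool.or_left_comm]
  have e8 : decide (∃ kn ∈ pvNoteOf, kn.2 = "pungent" ∧ PySem.Str.isIn kn.1 t = true)
      = (["pungent", "strong"] : List String).any (fun k => PySem.Str.isIn k t) := by
    simp [pvNoteOf, Bool.or_comm, Bool.or_assoc, Bool.or_left_comm]
  simp only [pvNoteOrder, pvGroups, List.filter_cons, List.filter_nil,
    List.filterMap_cons, List.filterMap_nil, e1, e2, e3, e4, e5, e6, e7, e8]
  generalize (["sweet"] : List String).any (fun k => PySem.Str.isIn k t) = c1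
  generalize (["savory", "umami"] : List String).any (fun k => PySem.Str.isIn k t) = c2
  generalize (["sour", "tart", "bright"] : List String).any (fun k => PySem.Str.isIn k t) = c3
  generalize (["bitter"] : List String).any (fun k => PySem.Str.isIn k t) = c4
  generalize (["rich", "creamy", "fatty"] : List String).any (fun k => PySem.Str.isIn k t) = c5
  generalize (["spicy", "hot"] : List String).any (fun k => PySem.Str.isIn k t) = c6
  generalize (["mild", "delicate"] : List String).any (fun k => PySem.Str.isIn k t) = c7
  generalize (["pungent", "strong"] : List String).any (fun k => PySem.Str.isIn k t) = c8
  revert c1 c2 c3 c4 c5 c6 c7 c8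
  decide

-- ===== VERDICT (by name: the statement is the Claim_ definition above) =====
theorem extract_flavor_notes_py_spec : Claim_equal_extract_flavor_notes_py := by
  intro properties _
  unfold Spec_extract_flavor_notes_py extract_flavor_notes_py extract_flavor_notes_py_alt
  cases h : (PySem.Dict.mk properties).get? "taste" with
  | none => simp
  | some t =>
    simp only [pvCoreA, pvCoreB]
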